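-- pv_equiv track=rewrite | github.com/james-cockayne/ParisAchilles | convert_sql.py | replace_tokens
-- ===== SOURCE A (Python) =====
-- def replace_tokens(sql_content):
--     """Replace SQL tokens with their values"""
--     replacements = {
--         '@scratchDatabaseSchema': 'achilles_scratch',
--         '@cdmDatabaseSchema': 'cdm',
--         '@tempAchillesPrefix': 'temp_achilles',
--         '@schemaDelim': '.',
--         '@source_name': 'Oxford',
--         '@achilles_version': 'Paris-0.0.1'
--
--     }
--
--     result = sql_content
--     for token, value in replacements.items():
--         result = result.replace(token, value)
--
--     return result
-- ===== SOURCE B (Python) =====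
-- def replace_tokens(sql_content):
--     """Replace SQL tokens with their values (single left-to-right scan)."""
--     replacements = {
--         '@scratchDatabaseSchema': 'achilles_scratch',
--         '@cdmDatabaseSchema': 'cdm',
--         '@tempAchillesPrefix': 'temp_achilles',
--         '@schemaDelim': '.',
--         '@source_name': 'Oxford',
--         '@achilles_version': 'Paris-0.0.1'
--     }
--     out = []
--     i = 0
--     n = len(sql_content)
--     while i < n:
--         for token, value in replacements.items():
--             if sql_content.startswith(token, i):
--                 out.append(value)
--                 i += len(token)
--                 break
--         else:
--             out.append(sql_content[i])
--             i += 1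
--     return ''.join(out)
-- ===== Notes on version B (the rewrite author's own statement) =====
-- stated objective: alternative
-- what changed: A makes six sequential full-string .replace passes (one per token); B makes a single left-to-right scan over the input, dispatching on the first token that matches at the current position and copying other characters through, so each token is matched against the original text only.
-- intended difference: On inputs containing the substring '@cdmDatabaseSchem@scratchDatabaseSchema', A's first pass rewrites '@scratchDatabaseSchema' to 'achilles_scratch', manufacturing a brand-new '@cdmDatabaseSchema' token that A's second pass then also replaces (witness: A returns 'cdmchilles_scratch'), while B replaces only the token actually present in the input and returns '@cdmDatabaseSchemachilles_scratch'; replacing a token the SQL never contained is a cascade artefact of sequential replacement, so B's value is the intended one. — e.g. on replace_tokens("@cdmDatabaseSchem@scratchDatabaseSchema"): A returns "cdmchilles_scratch", B returns "@cdmDatabaseSchemachilles_scratch"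
import Mathlib
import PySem

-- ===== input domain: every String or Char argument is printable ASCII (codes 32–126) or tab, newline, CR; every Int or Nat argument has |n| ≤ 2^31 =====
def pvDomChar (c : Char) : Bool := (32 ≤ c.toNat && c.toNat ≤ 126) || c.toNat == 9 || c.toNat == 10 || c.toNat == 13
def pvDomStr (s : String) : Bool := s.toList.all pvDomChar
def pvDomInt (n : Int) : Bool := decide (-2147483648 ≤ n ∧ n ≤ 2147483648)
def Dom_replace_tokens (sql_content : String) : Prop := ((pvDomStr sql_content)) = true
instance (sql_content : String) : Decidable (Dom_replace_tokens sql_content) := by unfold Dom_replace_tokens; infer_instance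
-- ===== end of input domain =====

-- B replaces A's six sequential full-string replace passes by one left-to-right scan
-- dispatching on the first matching token (objective: alternative, same cost); on inputs
-- containing '@cdmDatabaseSchem@scratchDatabaseSchema' A's passes cascade and B's value is
-- the intended one (see D_ below).

-- ===== PORT A =====
def pvReplacements : PySem.Dict String String := PySem.Dict.mk
  [("@scratchDatabaseSchema", "achilles_scratch"),
   ("@cdmDatabaseSchema", "cdm"),
   ("@tempAchillesPrefix", "temp_achilles"),
   ("@schemaDelim", "."),
   ("@source_name", "Oxford"),
   ("@achilles_version", "Paris-0.0.1")]

def replace_tokens (sql_content : String) : String :=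
  (PySem.Dict.items pvReplacements).foldl
    (fun result tv => PySem.Str.replace result tv.1 tv.2) sql_content

-- ===== PORT B =====
def pvPairsB : List (String × String) :=
  [("@scratchDatabaseSchema", "achilles_scratch"),
   ("@cdmDatabaseSchema", "cdm"),
   ("@tempAchillesPrefix", "temp_achilles"),
   ("@schemaDelim", "."),
   ("@source_name", "Oxford"),
   ("@achilles_version", "Paris-0.0.1")]

-- the inner for-else loop of Source B: first token matching at the scan position
def pvTry : List (String × String) → List Char → Option (List Char × Nat)
  | [], _ => none
  | (t, v) :: ps, l =>
    if t.toList.isPrefixOf l then some (v.toList, t.toList.length) else pvTry ps l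

-- the while loop of Source B; fuel = remaining length bounds the iterations (i strictly increases)
def pvScanGo : Nat → List Char → List Char
  | 0, _ => []
  | fuel + 1, l =>
    match pvTry pvPairsB l with
    | some vk => vk.1 ++ pvScanGo fuel (l.drop vk.2)
    | none =>
      match l with
      | [] => []
      | c :: r => c :: pvScanGo fuel r

def replace_tokens_alt (sql_content : String) : String :=
  String.ofList (pvScanGo sql_content.toList.length sql_content.toList)

-- ===== PRECONDITION & SPEC =====
-- On inputs containing '@cdmDatabaseSchem@scratchDatabaseSchema', A's first pass rewrites
-- '@scratchDatabaseSchema' into 'achilles_scratch', creating a new '@cdmDatabaseSchema' token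
-- that A's second pass also replaces (A: 'cdmchilles_scratch' at the witness); B replaces only
-- tokens present in the input ('@cdmDatabaseSchemachilles_scratch'), the intended behaviour.
def D_replace_tokens (sql_content : String) : Prop :=
  PySem.Str.isIn "@cdmDatabaseSchem@scratchDatabaseSchema" sql_content = true
instance (sql_content : String) : Decidable (D_replace_tokens sql_content) := by
  unfold D_replace_tokens; infer_instance

def Spec_replace_tokens (sql_content : String) (out : String) : Prop :=
  ¬ D_replace_tokens sql_content → out = replace_tokens_alt sql_content
instance (sql_content : String) (out : String) : Decidable (Spec_replace_tokens sql_content out) := by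
  unfold Spec_replace_tokens; infer_instance

def pvDiffWitness_replace_tokens : String := "@cdmDatabaseSchem@scratchDatabaseSchema"
def pvDiffWitnessOut_replace_tokens : String × String :=
  ("cdmchilles_scratch", "@cdmDatabaseSchemachilles_scratch")

-- ===== CLAIM (what is proved, stated in full; the proofs are below) =====
def Claim_unchanged_replace_tokens : Prop := ∀ (sql_content : String),
  Dom_replace_tokens sql_content → Spec_replace_tokens sql_content (replace_tokens sql_content)
def Claim_changed_replace_tokens : Prop :=
  Dom_replace_tokens (pvDiffWitness_replace_tokens) ∧
  D_replace_tokens (pvDiffWitness_replace_tokens) ∧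
  replace_tokens (pvDiffWitness_replace_tokens) = pvDiffWitnessOut_replace_tokens.1 ∧
  replace_tokens_alt (pvDiffWitness_replace_tokens) = pvDiffWitnessOut_replace_tokens.2 ∧
  pvDiffWitnessOut_replace_tokens.1 ≠ pvDiffWitnessOut_replace_tokens.2
def Claim_exact_replace_tokens : Prop := ∀ (sql_content : String),
  Dom_replace_tokens sql_content → D_replace_tokens sql_content →
  replace_tokens sql_content ≠ replace_tokens_alt sql_content

-- ===== LEMMAS AND PROOFS =====

-- token / value character lists
def pvT1 : List Char := "@scratchDatabaseSchema".toList
def pvT2 : List Char := "@cdmDatabaseSchema".toList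
def pvT3 : List Char := "@tempAchillesPrefix".toList
def pvT4 : List Char := "@schemaDelim".toList
def pvT5 : List Char := "@source_name".toList
def pvT6 : List Char := "@achilles_version".toList
def pvV1 : List Char := "achilles_scratch".toList
def pvV2 : List Char := "cdm".toList
def pvV3 : List Char := "temp_achilles".toList
def pvV4 : List Char := ".".toList
def pvV5 : List Char := "Oxford".toList
def pvV6 : List Char := "Paris-0.0.1".toList
def pvPat : List Char := "@cdmDatabaseSchem@scratchDatabaseSchema".toList

-- clean recursive form of Python str.replace (single pass, leftmost, non-overlapping)
def pvRep (old new : List Char) (l : List Char) : List Char :=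
  match l with
  | [] => []
  | c :: r =>
    if h : old.isPrefixOf (c :: r) ∧ old ≠ [] then
      new ++ pvRep old new ((c :: r).drop old.length)
    else
      c :: pvRep old new r
termination_by l.length
decreasing_by
  · simp only [List.length_drop]
    have : 0 < old.length := List.length_pos_iff.mpr h.2
    simp
    omega
  · simp

-- A's composite: the six replace passes in dict order
def pvA (l : List Char) : List Char :=
  pvRep pvT6 pvV6 (pvRep pvT5 pvV5 (pvRep pvT4 pvV4 (pvRep pvT3 pvV3
    (pvRep pvT2 pvV2 (pvRep pvT1 pvV1 l)))))

theorem pvRep_nil (old new : List Char) : pvRep old new [] = [] := by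
  rw [pvRep]

theorem pvRep_pos (old new l : List Char) (hne : old ≠ []) (h : old <+: l) :
    pvRep old new l = new ++ pvRep old new (l.drop old.length) := by
  cases l with
  | nil => exact absurd (List.prefix_nil.mp h) hne
  | cons c r =>
    rw [pvRep, dif_pos ⟨List.isPrefixOf_iff_prefix.mpr h, hne⟩]

theorem pvRep_neg (old new : List Char) (c : Char) (r : List Char) (h : ¬ old <+: c :: r) :
    pvRep old new (c :: r) = c :: pvRep old new r := by
  rw [pvRep, dif_neg (fun hh => h (List.isPrefixOf_iff_prefix.mp hh.1))]

-- Python str.replace (PySem fuel/accumulator loop) equals pvRep for nonempty old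
theorem pvGo_spec (old new : List Char) (hne : old ≠ []) :
    ∀ (fuel : Nat) (l acc : List Char), l.length ≤ fuel →
      PySem.Chars.replace.go old new fuel l acc = acc.reverse ++ pvRep old new l := by
  intro fuel
  induction fuel with
  | zero =>
    intro l acc hl
    have : l = [] := List.eq_nil_of_length_eq_zero (Nat.le_zero.mp hl)
    subst this
    simp [PySem.Chars.replace.go, pvRep_nil]
  | succ f IH =>
    intro l acc hl
    cases l with
    | nil => simp [PySem.Chars.replace.go, pvRep_nil]
    | cons c t =>
      rw [PySem.Chars.replace.go]
      by_cases hp : old.isPrefixOf (c :: t)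
      · rw [if_pos hp]
        have hpre : old <+: c :: t := List.isPrefixOf_iff_prefix.mp hp
        have hol : 0 < old.length := List.length_pos_iff.mpr hne
        have hlen : ((c :: t).drop old.length).length ≤ f := by
          simp only [List.length_drop]
          simp at hl ⊢
          omega
        rw [IH _ _ hlen, pvRep_pos old new (c :: t) hne hpre]
        simp
      · rw [if_neg hp]
        have hpre : ¬ old <+: c :: t := fun hh => hp (List.isPrefixOf_iff_prefix.mpr hh)
        have hlen : t.length ≤ f := by simp at hl; omega
        rw [IH _ _ hlen, pvRep_neg old new c t hpre]
        simp

theorem pvReplace_eq (old new l : List Char) (hne : old ≠ []) :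
    PySem.Chars.replace l old new = pvRep old new l := by
  rw [PySem.Chars.replace, if_neg (by simp [List.isEmpty_iff, hne])]
  simpa using pvGo_spec old new hne l.length l [] le_rfl

-- no token is a prefix of (any extension of) a different token
theorem pvNoCross (t u : List Char) (h1 : ¬ t <+: u) (h2 : ¬ u <+: t) (x : List Char) :
    ¬ t <+: u ++ x := by
  intro h
  rcases List.prefix_or_prefix_of_prefix h (List.prefix_append u x) with h' | h'
  · exact h1 h'
  · exact h2 h'

-- a replace pass slides over a block containing no occurrence start
theorem pvRep_skip (t v w x : List Char) (hk : ∀ k, k < w.length → ¬ t <+: (w ++ x).drop k) :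
    pvRep t v (w ++ x) = w ++ pvRep t v x := by
  induction w with
  | nil => simp
  | cons a w' IH =>
    have h0 : ¬ t <+: a :: (w' ++ x) := by
      have := hk 0 (by simp)
      simpa using this
    rw [List.cons_append, pvRep_neg t v a (w' ++ x) h0,
      IH (fun k hkw => by simpa using hk (k + 1) (by simp; omega))]
    simp

-- slide over a block with no '@' at all (a value block)
theorem pvHeadAt (t : List Char) (ht : t.head? = some '@') (d : Char) (y : List Char)
    (h : t <+: d :: y) : d = '@' := by
  cases t with
  | nil => simp at ht
  | cons a t' =>
    have ha : a = '@' := by simpa using ht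
    have had : a = d := (List.cons_prefix_cons.mp h).1
    rw [← had, ha]

theorem pvRep_skip_free (t v w x : List Char) (ht : t.head? = some '@') (hw : '@' ∉ w) :
    pvRep t v (w ++ x) = w ++ pvRep t v x := by
  apply pvRep_skip
  intro k hkw hpre
  rw [List.drop_append_of_le_length (Nat.le_of_lt hkw)] at hpre
  cases hd : w.drop k with
  | nil =>
    have := congrArg List.length hd
    simp at this
    omega
  | cons d ws =>
    rw [hd, List.cons_append] at hpre
    have hdat : d = '@' := pvHeadAt t ht d (ws ++ x) hpre
    have : d ∈ w := List.mem_of_mem_drop (by rw [hd]; exact List.mem_cons_self ..)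
    exact hw (hdat ▸ this)

-- no occurrence of t can start inside w when w has '@' only at its head
theorem pvNoPrefAt (t w x : List Char) (ht : t.head? = some '@') (hw : '@' ∉ w.tail)
    (h0 : ¬ t <+: w ++ x) : ∀ k, k < w.length → ¬ t <+: (w ++ x).drop k := by
  intro k hkw hpre
  cases k with
  | zero => exact h0 (by simpa using hpre)
  | succ k =>
    rw [List.drop_append_of_le_length (Nat.le_of_lt hkw)] at hpre
    have hshift : w.drop (k + 1) = w.tail.drop k := by
      rw [← List.drop_one, List.drop_drop]
      congr 1
      omega
    cases hd : w.drop (k + 1) with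
    | nil =>
      have := congrArg List.length hd
      simp at this
      omega
    | cons d ws =>
      rw [hd, List.cons_append] at hpre
      have hdat : d = '@' := pvHeadAt t ht d (ws ++ x) hpre
      have hdk : d ∈ w.tail.drop k := by rw [← hshift, hd]; exact List.mem_cons_self ..
      exact hw (hdat ▸ List.mem_of_mem_drop hdk)

-- slide over a foreign token block ('@' only at position 0, which mismatches by non-prefixness)
theorem pvRep_skip_tok (t v w x : List Char) (ht : t.head? = some '@') (hw : '@' ∉ w.tail)
    (h0 : ¬ t <+: w ++ x) : pvRep t v (w ++ x) = w ++ pvRep t v x :=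
  pvRep_skip t v w x (pvNoPrefAt t w x ht hw h0)

-- preservation: a pass whose value has no overlap with any suffix of p cannot create prefix p
theorem pvStep (p t v : List Char) (hne : t ≠ [])
    (H : ∀ z ∈ p.tails, z ≠ [] → ¬ z <+: v ∧ ¬ v <+: z) :
    ∀ (x z : List Char), z ≠ [] → z <:+ p → z <+: pvRep t v x → z <+: x := by
  suffices main : ∀ (n : Nat) (x z : List Char), x.length ≤ n → z ≠ [] → z <:+ p →
      z <+: pvRep t v x → z <+: x by
    intro x z hz hzs hzp
    exact main x.length x z le_rfl hz hzs hzp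
  intro n
  induction n with
  | zero =>
    intro x z hx hz hzs hzp
    have : x = [] := List.eq_nil_of_length_eq_zero (Nat.le_zero.mp hx)
    subst this
    rw [pvRep_nil] at hzp
    exact absurd (List.prefix_nil.mp hzp) hz
  | succ m IH =>
    intro x z hx hz hzs hzp
    by_cases hp : t <+: x
    · rw [pvRep_pos t v x hne hp] at hzp
      have hH := H z ((List.mem_tails z p).mpr hzs) hz
      rcases List.prefix_or_prefix_of_prefix hzp (List.prefix_append v _) with h' | h'
      · exact absurd h' hH.1
      · exact absurd h' hH.2
    · cases x with
      | nil =>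
        rw [pvRep_nil] at hzp
        exact absurd (List.prefix_nil.mp hzp) hz
      | cons c r =>
        rw [pvRep_neg t v c r hp] at hzp
        cases z with
        | nil => exact absurd rfl hz
        | cons z0 z' =>
          obtain ⟨hz0, hz'⟩ := List.cons_prefix_cons.mp hzp
          cases z' with
          | nil => exact List.cons_prefix_cons.mpr ⟨hz0, List.nil_prefix⟩
          | cons y ys =>
            have hz's : (y :: ys) <:+ p :=
              List.IsSuffix.trans (List.tail_suffix (z0 :: y :: ys)) hzs
            exact List.cons_prefix_cons.mpr
              ⟨hz0, IH r (y :: ys) (by simp at hx; omega) (by simp) hz's hz'⟩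

-- the one real overlap: pass 1 can create prefix tail₂ only from the cascade pattern
theorem pvStep2 : ∀ (x : List Char) (k : Nat), k ≤ 16 →
    (pvT2.tail.drop k) <+: pvRep pvT1 pvV1 x →
    (pvT2.tail.drop k) <+: x ∨ ((pvT2.tail.drop k).dropLast ++ pvT1) <+: x := by
  have hlen2 : pvT2.length = 18 := by decide
  have hT1ne : pvT1 ≠ [] := by decide
  have hnp1 : ∀ j, j < 16 → ¬ pvT2.tail.drop j <+: pvV1 := by
    intro j hj
    interval_cases j <;> decide
  have hnp2 : ∀ j, j < 16 → ¬ pvV1 <+: pvT2.tail.drop j := by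
    intro j hj
    interval_cases j <;> decide
  suffices main : ∀ (n : Nat) (x : List Char) (k : Nat), x.length ≤ n → k ≤ 16 →
      (pvT2.tail.drop k) <+: pvRep pvT1 pvV1 x →
      (pvT2.tail.drop k) <+: x ∨ ((pvT2.tail.drop k).dropLast ++ pvT1) <+: x by
    intro x k hk h
    exact main x.length x k le_rfl hk h
  intro n
  induction n with
  | zero =>
    intro x k hx hk h
    have hxnil : x = [] := List.eq_nil_of_length_eq_zero (Nat.le_zero.mp hx)
    subst hxnil
    rw [pvRep_nil] at h
    have := congrArg List.length (List.prefix_nil.mp h)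
    simp [hlen2] at this
    omega
  | succ m IH =>
    intro x k hx hk h
    by_cases hp : pvT1 <+: x
    · rw [pvRep_pos pvT1 pvV1 x hT1ne hp] at h
      by_cases hk16 : k = 16
      · subst hk16
        right
        have : (pvT2.tail.drop 16).dropLast = [] := by decide
        rw [this, List.nil_append]
        exact hp
      · exfalso
        have hklt : k < 16 := by omega
        rcases List.prefix_or_prefix_of_prefix h (List.prefix_append pvV1 _) with h' | h'
        · exact hnp1 k hklt h'
        · exact hnp2 k hklt h'
    · cases x with
      | nil =>
        rw [pvRep_nil] at h
        have := congrArg List.length (List.prefix_nil.mp h)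
        simp [hlen2] at this
        omega
      | cons c r =>
        rw [pvRep_neg pvT1 pvV1 c r hp] at h
        have hklen : k < pvT2.tail.length := by simp [hlen2]; omega
        have hkd : pvT2.tail.drop k = pvT2.tail[k]'hklen :: pvT2.tail.drop (k + 1) :=
          List.drop_eq_getElem_cons hklen
        rw [hkd] at h
        obtain ⟨hc, htail⟩ := List.cons_prefix_cons.mp h
        by_cases hk16 : k = 16
        · subst hk16
          left
          rw [hkd]
          have : pvT2.tail.drop 17 = [] := by decide
          rw [this] at htail ⊢
          exact List.cons_prefix_cons.mpr ⟨hc, List.nil_prefix⟩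
        · have hk1 : k + 1 ≤ 16 := by omega
          rcases IH r (k + 1) (by simp at hx; omega) hk1 htail with h' | h'
          · left
            rw [hkd]
            exact List.cons_prefix_cons.mpr ⟨hc, h'⟩
          · right
            have hne' : pvT2.tail.drop (k + 1) ≠ [] := by
              intro hh
              have := congrArg List.length hh
              simp [hlen2] at this
              omega
            have hdl : (pvT2.tail.drop k).dropLast
                = pvT2.tail[k]'hklen :: (pvT2.tail.drop (k + 1)).dropLast := by
              rw [hkd, List.dropLast_cons_of_ne_nil hne']
            rw [hdl, List.cons_append]
            exact List.cons_prefix_cons.mpr ⟨hc, h'⟩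

-- pvA on a string headed by token j (unconditional: earlier passes cannot match there)
theorem pvA_tok1 (r : List Char) : pvA (pvT1 ++ r) = pvV1 ++ pvA r := by
  unfold pvA
  rw [pvRep_pos pvT1 pvV1 _ (by decide) (List.prefix_append pvT1 _), List.drop_left]
  rw [pvRep_skip_free pvT2 pvV2 pvV1 _ (by decide) (by decide)]
  rw [pvRep_skip_free pvT3 pvV3 pvV1 _ (by decide) (by decide)]
  rw [pvRep_skip_free pvT4 pvV4 pvV1 _ (by decide) (by decide)]
  rw [pvRep_skip_free pvT5 pvV5 pvV1 _ (by decide) (by decide)]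
  rw [pvRep_skip_free pvT6 pvV6 pvV1 _ (by decide) (by decide)]
theorem pvA_tok2 (r : List Char) : pvA (pvT2 ++ r) = pvV2 ++ pvA r := by
  unfold pvA
  rw [pvRep_skip_tok pvT1 pvV1 pvT2 _ (by decide) (by decide)
    (pvNoCross pvT1 pvT2 (by decide) (by decide) _)]
  rw [pvRep_pos pvT2 pvV2 _ (by decide) (List.prefix_append pvT2 _), List.drop_left]
  rw [pvRep_skip_free pvT3 pvV3 pvV2 _ (by decide) (by decide)]
  rw [pvRep_skip_free pvT4 pvV4 pvV2 _ (by decide) (by decide)]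
  rw [pvRep_skip_free pvT5 pvV5 pvV2 _ (by decide) (by decide)]
  rw [pvRep_skip_free pvT6 pvV6 pvV2 _ (by decide) (by decide)]
theorem pvA_tok3 (r : List Char) : pvA (pvT3 ++ r) = pvV3 ++ pvA r := by
  unfold pvA
  rw [pvRep_skip_tok pvT1 pvV1 pvT3 _ (by decide) (by decide)
    (pvNoCross pvT1 pvT3 (by decide) (by decide) _)]
  rw [pvRep_skip_tok pvT2 pvV2 pvT3 _ (by decide) (by decide)
    (pvNoCross pvT2 pvT3 (by decide) (by decide) _)]
  rw [pvRep_pos pvT3 pvV3 _ (by decide) (List.prefix_append pvT3 _), List.drop_left]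
  rw [pvRep_skip_free pvT4 pvV4 pvV3 _ (by decide) (by decide)]
  rw [pvRep_skip_free pvT5 pvV5 pvV3 _ (by decide) (by decide)]
  rw [pvRep_skip_free pvT6 pvV6 pvV3 _ (by decide) (by decide)]
theorem pvA_tok4 (r : List Char) : pvA (pvT4 ++ r) = pvV4 ++ pvA r := by
  unfold pvA
  rw [pvRep_skip_tok pvT1 pvV1 pvT4 _ (by decide) (by decide)
    (pvNoCross pvT1 pvT4 (by decide) (by decide) _)]
  rw [pvRep_skip_tok pvT2 pvV2 pvT4 _ (by decide) (by decide)
    (pvNoCross pvT2 pvT4 (by decide) (by decide) _)]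
  rw [pvRep_skip_tok pvT3 pvV3 pvT4 _ (by decide) (by decide)
    (pvNoCross pvT3 pvT4 (by decide) (by decide) _)]
  rw [pvRep_pos pvT4 pvV4 _ (by decide) (List.prefix_append pvT4 _), List.drop_left]
  rw [pvRep_skip_free pvT5 pvV5 pvV4 _ (by decide) (by decide)]
  rw [pvRep_skip_free pvT6 pvV6 pvV4 _ (by decide) (by decide)]
theorem pvA_tok5 (r : List Char) : pvA (pvT5 ++ r) = pvV5 ++ pvA r := by
  unfold pvA
  rw [pvRep_skip_tok pvT1 pvV1 pvT5 _ (by decide) (by decide)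
    (pvNoCross pvT1 pvT5 (by decide) (by decide) _)]
  rw [pvRep_skip_tok pvT2 pvV2 pvT5 _ (by decide) (by decide)
    (pvNoCross pvT2 pvT5 (by decide) (by decide) _)]
  rw [pvRep_skip_tok pvT3 pvV3 pvT5 _ (by decide) (by decide)
    (pvNoCross pvT3 pvT5 (by decide) (by decide) _)]
  rw [pvRep_skip_tok pvT4 pvV4 pvT5 _ (by decide) (by decide)
    (pvNoCross pvT4 pvT5 (by decide) (by decide) _)]
  rw [pvRep_pos pvT5 pvV5 _ (by decide) (List.prefix_append pvT5 _), List.drop_left]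
  rw [pvRep_skip_free pvT6 pvV6 pvV5 _ (by decide) (by decide)]
theorem pvA_tok6 (r : List Char) : pvA (pvT6 ++ r) = pvV6 ++ pvA r := by
  unfold pvA
  rw [pvRep_skip_tok pvT1 pvV1 pvT6 _ (by decide) (by decide)
    (pvNoCross pvT1 pvT6 (by decide) (by decide) _)]
  rw [pvRep_skip_tok pvT2 pvV2 pvT6 _ (by decide) (by decide)
    (pvNoCross pvT2 pvT6 (by decide) (by decide) _)]
  rw [pvRep_skip_tok pvT3 pvV3 pvT6 _ (by decide) (by decide)
    (pvNoCross pvT3 pvT6 (by decide) (by decide) _)]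
  rw [pvRep_skip_tok pvT4 pvV4 pvT6 _ (by decide) (by decide)
    (pvNoCross pvT4 pvT6 (by decide) (by decide) _)]
  rw [pvRep_skip_tok pvT5 pvV5 pvT6 _ (by decide) (by decide)
    (pvNoCross pvT5 pvT6 (by decide) (by decide) _)]
  rw [pvRep_pos pvT6 pvV6 _ (by decide) (List.prefix_append pvT6 _), List.drop_left]

-- pvA on a string headed by a non-token character
theorem pvA_cons (c : Char) (r : List Char)
    (h1 : ¬ pvT1 <+: c :: r) (h2 : ¬ pvT2 <+: c :: r) (h3 : ¬ pvT3 <+: c :: r)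
    (h4 : ¬ pvT4 <+: c :: r) (h5 : ¬ pvT5 <+: c :: r) (h6 : ¬ pvT6 <+: c :: r)
    (hpat : c = '@' → ¬ pvPat.tail <+: r) :
    pvA (c :: r) = c :: pvA r := by
  have conv : ∀ (t : List Char) (X : List Char), t.head? = some '@' →
      ¬ t.tail <+: X → ¬ t <+: '@' :: X := by
    intro t X ht hnt hpre
    cases t with
    | nil => simp at ht
    | cons a t' => exact hnt (List.cons_prefix_cons.mp hpre).2
  by_cases hc : c = '@'
  · subst hc
    have a1 : ¬ pvT1.tail <+: r := by
      intro h
      apply h1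
      have he : pvT1 = '@' :: pvT1.tail := by decide
      rw [he]
      exact List.cons_prefix_cons.mpr ⟨rfl, h⟩
    have a2 : ¬ pvT2.tail <+: r := by
      intro h
      apply h2
      have he : pvT2 = '@' :: pvT2.tail := by decide
      rw [he]
      exact List.cons_prefix_cons.mpr ⟨rfl, h⟩
    have a3 : ¬ pvT3.tail <+: r := by
      intro h
      apply h3
      have he : pvT3 = '@' :: pvT3.tail := by decide
      rw [he]
      exact List.cons_prefix_cons.mpr ⟨rfl, h⟩
    have a4 : ¬ pvT4.tail <+: r := by
      intro h
      apply h4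
      have he : pvT4 = '@' :: pvT4.tail := by decide
      rw [he]
      exact List.cons_prefix_cons.mpr ⟨rfl, h⟩
    have a5 : ¬ pvT5.tail <+: r := by
      intro h
      apply h5
      have he : pvT5 = '@' :: pvT5.tail := by decide
      rw [he]
      exact List.cons_prefix_cons.mpr ⟨rfl, h⟩
    have a6 : ¬ pvT6.tail <+: r := by
      intro h
      apply h6
      have he : pvT6 = '@' :: pvT6.tail := by decide
      rw [he]
      exact List.cons_prefix_cons.mpr ⟨rfl, h⟩
    have b2 : ¬ pvT2.tail <+: pvRep pvT1 pvV1 r := by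
      intro h
      rcases pvStep2 r 0 (by omega) (by simpa using h) with h' | h'
      · exact a2 (by simpa using h')
      · apply hpat rfl
        have he : pvPat.tail = (pvT2.tail.drop 0).dropLast ++ pvT1 := by decide
        rw [he]
        exact h'
    have b3 : ¬ pvT3.tail <+: (pvRep pvT2 pvV2 (pvRep pvT1 pvV1 r)) := by
      intro h
      have s2 := pvStep pvT3.tail pvT2 pvV2 (by decide) (by decide)
        (pvRep pvT1 pvV1 r) pvT3.tail (by decide) (List.suffix_refl _) h
      have s1 := pvStep pvT3.tail pvT1 pvV1 (by decide) (by decide)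
        r pvT3.tail (by decide) (List.suffix_refl _) s2
      exact a3 s1
    have b4 : ¬ pvT4.tail <+: (pvRep pvT3 pvV3 (pvRep pvT2 pvV2 (pvRep pvT1 pvV1 r))) := by
      intro h
      have s3 := pvStep pvT4.tail pvT3 pvV3 (by decide) (by decide)
        (pvRep pvT2 pvV2 (pvRep pvT1 pvV1 r)) pvT4.tail (by decide) (List.suffix_refl _) h
      have s2 := pvStep pvT4.tail pvT2 pvV2 (by decide) (by decide)
        (pvRep pvT1 pvV1 r) pvT4.tail (by decide) (List.suffix_refl _) s3
      have s1 := pvStep pvT4.tail pvT1 pvV1 (by decide) (by decide)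
        r pvT4.tail (by decide) (List.suffix_refl _) s2
      exact a4 s1
    have b5 : ¬ pvT5.tail <+: (pvRep pvT4 pvV4 (pvRep pvT3 pvV3 (pvRep pvT2 pvV2 (pvRep pvT1 pvV1 r)))) := by
      intro h
      have s4 := pvStep pvT5.tail pvT4 pvV4 (by decide) (by decide)
        (pvRep pvT3 pvV3 (pvRep pvT2 pvV2 (pvRep pvT1 pvV1 r))) pvT5.tail (by decide) (List.suffix_refl _) h
      have s3 := pvStep pvT5.tail pvT3 pvV3 (by decide) (by decide)
        (pvRep pvT2 pvV2 (pvRep pvT1 pvV1 r)) pvT5.tail (by decide) (List.suffix_refl _) s4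
      have s2 := pvStep pvT5.tail pvT2 pvV2 (by decide) (by decide)
        (pvRep pvT1 pvV1 r) pvT5.tail (by decide) (List.suffix_refl _) s3
      have s1 := pvStep pvT5.tail pvT1 pvV1 (by decide) (by decide)
        r pvT5.tail (by decide) (List.suffix_refl _) s2
      exact a5 s1
    have b6 : ¬ pvT6.tail <+: (pvRep pvT5 pvV5 (pvRep pvT4 pvV4 (pvRep pvT3 pvV3 (pvRep pvT2 pvV2 (pvRep pvT1 pvV1 r))))) := by
      intro h
      have s5 := pvStep pvT6.tail pvT5 pvV5 (by decide) (by decide)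
        (pvRep pvT4 pvV4 (pvRep pvT3 pvV3 (pvRep pvT2 pvV2 (pvRep pvT1 pvV1 r)))) pvT6.tail (by decide) (List.suffix_refl _) h
      have s4 := pvStep pvT6.tail pvT4 pvV4 (by decide) (by decide)
        (pvRep pvT3 pvV3 (pvRep pvT2 pvV2 (pvRep pvT1 pvV1 r))) pvT6.tail (by decide) (List.suffix_refl _) s5
      have s3 := pvStep pvT6.tail pvT3 pvV3 (by decide) (by decide)
        (pvRep pvT2 pvV2 (pvRep pvT1 pvV1 r)) pvT6.tail (by decide) (List.suffix_refl _) s4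
      have s2 := pvStep pvT6.tail pvT2 pvV2 (by decide) (by decide)
        (pvRep pvT1 pvV1 r) pvT6.tail (by decide) (List.suffix_refl _) s3
      have s1 := pvStep pvT6.tail pvT1 pvV1 (by decide) (by decide)
        r pvT6.tail (by decide) (List.suffix_refl _) s2
      exact a6 s1
    unfold pvA
    rw [pvRep_neg pvT1 pvV1 '@' r h1]
    rw [pvRep_neg pvT2 pvV2 '@' _ (conv pvT2 (pvRep pvT1 pvV1 r) (by decide) b2)]
    rw [pvRep_neg pvT3 pvV3 '@' _ (conv pvT3 (pvRep pvT2 pvV2 (pvRep pvT1 pvV1 r)) (by decide) b3)]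
    rw [pvRep_neg pvT4 pvV4 '@' _ (conv pvT4 (pvRep pvT3 pvV3 (pvRep pvT2 pvV2 (pvRep pvT1 pvV1 r))) (by decide) b4)]
    rw [pvRep_neg pvT5 pvV5 '@' _ (conv pvT5 (pvRep pvT4 pvV4 (pvRep pvT3 pvV3 (pvRep pvT2 pvV2 (pvRep pvT1 pvV1 r)))) (by decide) b5)]
    rw [pvRep_neg pvT6 pvV6 '@' _ (conv pvT6 (pvRep pvT5 pvV5 (pvRep pvT4 pvV4 (pvRep pvT3 pvV3 (pvRep pvT2 pvV2 (pvRep pvT1 pvV1 r))))) (by decide) b6)]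
  · have key : ∀ (t : List Char), t.head? = some '@' → ∀ X, ¬ t <+: c :: X := by
      intro t ht X hpre
      exact hc (pvHeadAt t ht c X hpre)
    unfold pvA
    rw [pvRep_neg pvT1 pvV1 c r (key pvT1 (by decide) r),
        pvRep_neg pvT2 pvV2 c _ (key pvT2 (by decide) _),
        pvRep_neg pvT3 pvV3 c _ (key pvT3 (by decide) _),
        pvRep_neg pvT4 pvV4 c _ (key pvT4 (by decide) _),
        pvRep_neg pvT5 pvV5 c _ (key pvT5 (by decide) _),
        pvRep_neg pvT6 pvV6 c _ (key pvT6 (by decide) _)]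

theorem pvTry_tok1 (r : List Char) :
    pvTry pvPairsB (pvT1 ++ r) = some (pvV1, pvT1.length) := by
  have p1 : ("@scratchDatabaseSchema".toList) <+: pvT1 ++ r :=
    List.prefix_append pvT1 r
  simp [pvTry, pvPairsB, p1, pvT1, pvV1]

theorem pvTry_tok2 (r : List Char) :
    pvTry pvPairsB (pvT2 ++ r) = some (pvV2, pvT2.length) := by
  have n1 : ¬ ("@scratchDatabaseSchema".toList <+: pvT2 ++ r) :=
    pvNoCross pvT1 pvT2 (by decide) (by decide) r
  have p2 : ("@cdmDatabaseSchema".toList) <+: pvT2 ++ r :=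
    List.prefix_append pvT2 r
  simp [pvTry, pvPairsB, n1, p2, pvT2, pvV2]

theorem pvTry_tok3 (r : List Char) :
    pvTry pvPairsB (pvT3 ++ r) = some (pvV3, pvT3.length) := by
  have n1 : ¬ ("@scratchDatabaseSchema".toList <+: pvT3 ++ r) :=
    pvNoCross pvT1 pvT3 (by decide) (by decide) r
  have n2 : ¬ ("@cdmDatabaseSchema".toList <+: pvT3 ++ r) :=
    pvNoCross pvT2 pvT3 (by decide) (by decide) r
  have p3 : ("@tempAchillesPrefix".toList) <+: pvT3 ++ r :=
    List.prefix_append pvT3 r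
  simp [pvTry, pvPairsB, n1, n2, p3, pvT3, pvV3]

theorem pvTry_tok4 (r : List Char) :
    pvTry pvPairsB (pvT4 ++ r) = some (pvV4, pvT4.length) := by
  have n1 : ¬ ("@scratchDatabaseSchema".toList <+: pvT4 ++ r) :=
    pvNoCross pvT1 pvT4 (by decide) (by decide) r
  have n2 : ¬ ("@cdmDatabaseSchema".toList <+: pvT4 ++ r) :=
    pvNoCross pvT2 pvT4 (by decide) (by decide) r
  have n3 : ¬ ("@tempAchillesPrefix".toList <+: pvT4 ++ r) :=
    pvNoCross pvT3 pvT4 (by decide) (by decide) r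
  have p4 : ("@schemaDelim".toList) <+: pvT4 ++ r :=
    List.prefix_append pvT4 r
  simp [pvTry, pvPairsB, n1, n2, n3, p4, pvT4, pvV4]

theorem pvTry_tok5 (r : List Char) :
    pvTry pvPairsB (pvT5 ++ r) = some (pvV5, pvT5.length) := by
  have n1 : ¬ ("@scratchDatabaseSchema".toList <+: pvT5 ++ r) :=
    pvNoCross pvT1 pvT5 (by decide) (by decide) r
  have n2 : ¬ ("@cdmDatabaseSchema".toList <+: pvT5 ++ r) :=
    pvNoCross pvT2 pvT5 (by decide) (by decide) r
  have n3 : ¬ ("@tempAchillesPrefix".toList <+: pvT5 ++ r) :=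
    pvNoCross pvT3 pvT5 (by decide) (by decide) r
  have n4 : ¬ ("@schemaDelim".toList <+: pvT5 ++ r) :=
    pvNoCross pvT4 pvT5 (by decide) (by decide) r
  have p5 : ("@source_name".toList) <+: pvT5 ++ r :=
    List.prefix_append pvT5 r
  simp [pvTry, pvPairsB, n1, n2, n3, n4, p5, pvT5, pvV5]

theorem pvTry_tok6 (r : List Char) :
    pvTry pvPairsB (pvT6 ++ r) = some (pvV6, pvT6.length) := by
  have n1 : ¬ ("@scratchDatabaseSchema".toList <+: pvT6 ++ r) :=
    pvNoCross pvT1 pvT6 (by decide) (by decide) r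
  have n2 : ¬ ("@cdmDatabaseSchema".toList <+: pvT6 ++ r) :=
    pvNoCross pvT2 pvT6 (by decide) (by decide) r
  have n3 : ¬ ("@tempAchillesPrefix".toList <+: pvT6 ++ r) :=
    pvNoCross pvT3 pvT6 (by decide) (by decide) r
  have n4 : ¬ ("@schemaDelim".toList <+: pvT6 ++ r) :=
    pvNoCross pvT4 pvT6 (by decide) (by decide) r
  have n5 : ¬ ("@source_name".toList <+: pvT6 ++ r) :=
    pvNoCross pvT5 pvT6 (by decide) (by decide) r
  have p6 : ("@achilles_version".toList) <+: pvT6 ++ r :=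
    List.prefix_append pvT6 r
  simp [pvTry, pvPairsB, n1, n2, n3, n4, n5, p6, pvT6, pvV6]

theorem pvTry_none (l : List Char)
    (h1 : ¬ pvT1 <+: l) (h2 : ¬ pvT2 <+: l) (h3 : ¬ pvT3 <+: l)
    (h4 : ¬ pvT4 <+: l) (h5 : ¬ pvT5 <+: l) (h6 : ¬ pvT6 <+: l) :
    pvTry pvPairsB l = none := by
  have f1 : ¬ (['@', 's', 'c', 'r', 'a', 't', 'c', 'h', 'D', 'a', 't', 'a', 'b', 'a', 's', 'e', 'S', 'c', 'h', 'e', 'm', 'a'] <+: l) := h1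
  have f2 : ¬ (['@', 'c', 'd', 'm', 'D', 'a', 't', 'a', 'b', 'a', 's', 'e', 'S', 'c', 'h', 'e', 'm', 'a'] <+: l) := h2
  have f3 : ¬ (['@', 't', 'e', 'm', 'p', 'A', 'c', 'h', 'i', 'l', 'l', 'e', 's', 'P', 'r', 'e', 'f', 'i', 'x'] <+: l) := h3
  have f4 : ¬ (['@', 's', 'c', 'h', 'e', 'm', 'a', 'D', 'e', 'l', 'i', 'm'] <+: l) := h4
  have f5 : ¬ (['@', 's', 'o', 'u', 'r', 'c', 'e', '_', 'n', 'a', 'm', 'e'] <+: l) := h5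
  have f6 : ¬ (['@', 'a', 'c', 'h', 'i', 'l', 'l', 'e', 's', '_', 'v', 'e', 'r', 's', 'i', 'o', 'n'] <+: l) := h6
  simp [pvTry, pvPairsB, f1, f2, f3, f4, f5, f6]

-- the main equivalence on character lists, away from the cascade pattern
theorem pvMain : ∀ (fuel : Nat) (l : List Char), l.length ≤ fuel → ¬ pvPat <:+: l →
    pvA l = pvScanGo fuel l := by
  intro fuel
  induction fuel with
  | zero =>
    intro l hl _
    have : l = [] := List.eq_nil_of_length_eq_zero (Nat.le_zero.mp hl)
    subst this
    simp [pvA, pvRep_nil, pvScanGo]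
  | succ f IH =>
    intro l hl hpat
    by_cases h1 : pvT1 <+: l
    · obtain ⟨r, rfl⟩ := h1
      have hr : ¬ pvPat <:+: r := fun h => hpat (h.trans (List.suffix_append pvT1 r).isInfix)
      have htl : pvT1.length = 22 := by decide
      have hlen : r.length ≤ f := by simp [List.length_append, htl] at hl ⊢; omega
      have hsc : pvScanGo (f + 1) (pvT1 ++ r) = pvV1 ++ pvScanGo f r := by
        simp [pvScanGo, pvTry_tok1, List.drop_left]
      rw [pvA_tok1, hsc, IH r hlen hr]
    by_cases h2 : pvT2 <+: l
    · obtain ⟨r, rfl⟩ := h2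
      have hr : ¬ pvPat <:+: r := fun h => hpat (h.trans (List.suffix_append pvT2 r).isInfix)
      have htl : pvT2.length = 18 := by decide
      have hlen : r.length ≤ f := by simp [List.length_append, htl] at hl ⊢; omega
      have hsc : pvScanGo (f + 1) (pvT2 ++ r) = pvV2 ++ pvScanGo f r := by
        simp [pvScanGo, pvTry_tok2, List.drop_left]
      rw [pvA_tok2, hsc, IH r hlen hr]
    by_cases h3 : pvT3 <+: l
    · obtain ⟨r, rfl⟩ := h3
      have hr : ¬ pvPat <:+: r := fun h => hpat (h.trans (List.suffix_append pvT3 r).isInfix)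
      have htl : pvT3.length = 19 := by decide
      have hlen : r.length ≤ f := by simp [List.length_append, htl] at hl ⊢; omega
      have hsc : pvScanGo (f + 1) (pvT3 ++ r) = pvV3 ++ pvScanGo f r := by
        simp [pvScanGo, pvTry_tok3, List.drop_left]
      rw [pvA_tok3, hsc, IH r hlen hr]
    by_cases h4 : pvT4 <+: l
    · obtain ⟨r, rfl⟩ := h4
      have hr : ¬ pvPat <:+: r := fun h => hpat (h.trans (List.suffix_append pvT4 r).isInfix)
      have htl : pvT4.length = 12 := by decide
      have hlen : r.length ≤ f := by simp [List.length_append, htl] at hl ⊢; omega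
      have hsc : pvScanGo (f + 1) (pvT4 ++ r) = pvV4 ++ pvScanGo f r := by
        simp [pvScanGo, pvTry_tok4, List.drop_left]
      rw [pvA_tok4, hsc, IH r hlen hr]
    by_cases h5 : pvT5 <+: l
    · obtain ⟨r, rfl⟩ := h5
      have hr : ¬ pvPat <:+: r := fun h => hpat (h.trans (List.suffix_append pvT5 r).isInfix)
      have htl : pvT5.length = 12 := by decide
      have hlen : r.length ≤ f := by simp [List.length_append, htl] at hl ⊢; omega
      have hsc : pvScanGo (f + 1) (pvT5 ++ r) = pvV5 ++ pvScanGo f r := by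
        simp [pvScanGo, pvTry_tok5, List.drop_left]
      rw [pvA_tok5, hsc, IH r hlen hr]
    by_cases h6 : pvT6 <+: l
    · obtain ⟨r, rfl⟩ := h6
      have hr : ¬ pvPat <:+: r := fun h => hpat (h.trans (List.suffix_append pvT6 r).isInfix)
      have htl : pvT6.length = 17 := by decide
      have hlen : r.length ≤ f := by simp [List.length_append, htl] at hl ⊢; omega
      have hsc : pvScanGo (f + 1) (pvT6 ++ r) = pvV6 ++ pvScanGo f r := by
        simp [pvScanGo, pvTry_tok6, List.drop_left]
      rw [pvA_tok6, hsc, IH r hlen hr]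
    cases l with
    | nil => simp [pvA, pvRep_nil, pvScanGo, pvTry, pvPairsB]
    | cons c r =>
      have hn : pvTry pvPairsB (c :: r) = none := pvTry_none _ h1 h2 h3 h4 h5 h6
      have hsc : pvScanGo (f + 1) (c :: r) = c :: pvScanGo f r := by
        simp [pvScanGo, hn]
      have hp' : c = '@' → ¬ pvPat.tail <+: r := by
        intro hc hpre
        apply hpat
        have he : pvPat = '@' :: pvPat.tail := by decide
        rw [he, ← hc]
        exact (List.cons_prefix_cons.mpr ⟨rfl, hpre⟩).isInfix
      have hr : ¬ pvPat <:+: r := fun h => hpat (h.trans (List.suffix_cons c r).isInfix)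
      rw [pvA_cons c r h1 h2 h3 h4 h5 h6 hp', hsc, IH r (by simp at hl; omega) hr]

-- scanGo on the empty list
theorem pvScanGo_nil (fuel : Nat) : pvScanGo fuel [] = [] := by
  cases fuel <;> simp [pvScanGo, pvTry, pvPairsB]

-- no token matches at a non-'@' character
theorem pvTry_char (c : Char) (hc : c ≠ '@') (r : List Char) :
    pvTry pvPairsB (c :: r) = none :=
  pvTry_none _ (fun h => hc (pvHeadAt pvT1 (by decide) c r h))
    (fun h => hc (pvHeadAt pvT2 (by decide) c r h))
    (fun h => hc (pvHeadAt pvT3 (by decide) c r h))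
    (fun h => hc (pvHeadAt pvT4 (by decide) c r h))
    (fun h => hc (pvHeadAt pvT5 (by decide) c r h))
    (fun h => hc (pvHeadAt pvT6 (by decide) c r h))

-- the scan copies an '@'-free block through
theorem pvScan_skip_free : ∀ (y : List Char) (fuel : Nat) (x : List Char), '@' ∉ y →
    y.length + x.length ≤ fuel → pvScanGo fuel (y ++ x) = y ++ pvScanGo (fuel - y.length) x := by
  intro y
  induction y with
  | nil => intro fuel x _ _; simp
  | cons a y' IH =>
    intro fuel x hy hf
    cases fuel with
    | zero => simp at hf
    | succ f =>
      have ha : a ≠ '@' := fun h => hy (h ▸ List.mem_cons_self ..)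
      have h1 : pvScanGo (f + 1) (a :: (y' ++ x)) = a :: pvScanGo f (y' ++ x) := by
        simp [pvScanGo, pvTry_char a ha]
      rw [List.cons_append, h1, IH f x (fun h => hy (List.mem_cons_of_mem a h)) (by simp at hf; omega)]
      have hfe : f + 1 - (a :: y').length = f - y'.length := by simp
      rw [hfe]
      simp

-- an infix of w ++ x that cannot start inside w is an infix of x
theorem pvInfix_skip (w x : List Char) (hw : '@' ∉ w.tail)
    (h0 : ∀ y, ¬ pvPat <+: w ++ y) (h : pvPat <:+: w ++ x) : pvPat <:+: x := by
  obtain ⟨t, hpt, hts⟩ := List.infix_iff_prefix_suffix.mp h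
  obtain ⟨u, hu⟩ := hts
  by_cases hk : w.length ≤ u.length
  · have hx : u.drop w.length ++ t = x := by
      have := congrArg (List.drop w.length) hu
      rwa [List.drop_append_of_le_length hk, List.drop_left] at this
    exact List.infix_iff_prefix_suffix.mpr ⟨t, hpt, ⟨u.drop w.length, hx⟩⟩
  · exfalso
    have ht : t = (w ++ x).drop u.length := by
      rw [← hu, List.drop_left']
      rfl
    exact pvNoPrefAt pvPat w x (by decide) hw (h0 x) u.length (by omega) (ht ▸ hpt)

theorem pvInfix_tok1 (r : List Char) (h : pvPat <:+: pvT1 ++ r) : pvPat <:+: r :=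
  pvInfix_skip pvT1 r (by decide)
    (fun y => pvNoCross pvPat pvT1 (by decide) (by decide) y) h

theorem pvInfix_tok2 (r : List Char) (h : pvPat <:+: pvT2 ++ r) : pvPat <:+: r :=
  pvInfix_skip pvT2 r (by decide)
    (fun y => pvNoCross pvPat pvT2 (by decide) (by decide) y) h

theorem pvInfix_tok3 (r : List Char) (h : pvPat <:+: pvT3 ++ r) : pvPat <:+: r :=
  pvInfix_skip pvT3 r (by decide)
    (fun y => pvNoCross pvPat pvT3 (by decide) (by decide) y) h

theorem pvInfix_tok4 (r : List Char) (h : pvPat <:+: pvT4 ++ r) : pvPat <:+: r :=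
  pvInfix_skip pvT4 r (by decide)
    (fun y => pvNoCross pvPat pvT4 (by decide) (by decide) y) h

theorem pvInfix_tok5 (r : List Char) (h : pvPat <:+: pvT5 ++ r) : pvPat <:+: r :=
  pvInfix_skip pvT5 r (by decide)
    (fun y => pvNoCross pvPat pvT5 (by decide) (by decide) y) h

theorem pvInfix_tok6 (r : List Char) (h : pvPat <:+: pvT6 ++ r) : pvPat <:+: r :=
  pvInfix_skip pvT6 r (by decide)
    (fun y => pvNoCross pvPat pvT6 (by decide) (by decide) y) h

-- A's passes on a string starting with the cascade pattern
theorem pvA_pat (w : List Char) (h1 : ¬ pvT1 <+: pvPat ++ w) :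
    pvA (pvPat ++ w) = pvV2 ++ ("chilles_scratch".toList ++ pvA w) := by
  have hsplit : pvPat ++ w = "@cdmDatabaseSchem".toList ++ (pvT1 ++ w) := by
    rw [(by decide : pvPat = "@cdmDatabaseSchem".toList ++ pvT1), List.append_assoc]
  unfold pvA
  rw [hsplit]
  rw [pvRep_skip_tok pvT1 pvV1 _ _ (by decide) (by decide) (hsplit ▸ h1)]
  rw [pvRep_pos pvT1 pvV1 _ (by decide) (List.prefix_append _ _), List.drop_left]
  have hjoin : "@cdmDatabaseSchem".toList ++ (pvV1 ++ pvRep pvT1 pvV1 w)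
      = pvT2 ++ ("chilles_scratch".toList ++ pvRep pvT1 pvV1 w) := by
    rw [← List.append_assoc, ← List.append_assoc,
      (by decide : "@cdmDatabaseSchem".toList ++ pvV1 = pvT2 ++ "chilles_scratch".toList)]
  rw [hjoin]
  rw [pvRep_pos pvT2 pvV2 _ (by decide) (List.prefix_append _ _), List.drop_left]
  rw [pvRep_skip_free pvT2 pvV2 ("chilles_scratch".toList) _ (by decide) (by decide)]
  rw [pvRep_skip_free pvT3 pvV3 pvV2 _ (by decide) (by decide),
      pvRep_skip_free pvT3 pvV3 ("chilles_scratch".toList) _ (by decide) (by decide)]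
  rw [pvRep_skip_free pvT4 pvV4 pvV2 _ (by decide) (by decide),
      pvRep_skip_free pvT4 pvV4 ("chilles_scratch".toList) _ (by decide) (by decide)]
  rw [pvRep_skip_free pvT5 pvV5 pvV2 _ (by decide) (by decide),
      pvRep_skip_free pvT5 pvV5 ("chilles_scratch".toList) _ (by decide) (by decide)]
  rw [pvRep_skip_free pvT6 pvV6 pvV2 _ (by decide) (by decide),
      pvRep_skip_free pvT6 pvV6 ("chilles_scratch".toList) _ (by decide) (by decide)]

-- A's output is never longer than B's, and strictly shorter once the pattern occurs
theorem pvLen : ∀ (n : Nat) (l : List Char), l.length ≤ n → ∀ (fuel : Nat), l.length ≤ fuel →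
    (pvA l).length ≤ (pvScanGo fuel l).length ∧
    (pvPat <:+: l → (pvA l).length < (pvScanGo fuel l).length) := by
  intro n
  induction n with
  | zero =>
    intro l hl fuel _
    have : l = [] := List.eq_nil_of_length_eq_zero (Nat.le_zero.mp hl)
    subst this
    exact ⟨by simp [pvA, pvRep_nil, pvScanGo_nil],
      fun hp => absurd (by simpa using hp) (by decide)⟩
  | succ m IH =>
    intro l hl fuel hf
    by_cases h1 : pvT1 <+: l
    · obtain ⟨r, rfl⟩ := h1
      have htl : pvT1.length = 22 := by decide
      cases fuel with
      | zero => exfalso; simp [List.length_append, htl] at hf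
      | succ f =>
        have hsc : pvScanGo (f + 1) (pvT1 ++ r) = pvV1 ++ pvScanGo f r := by
          simp [pvScanGo, pvTry_tok1, List.drop_left]
        have hrn : r.length ≤ m := by simp [List.length_append, htl] at hl; omega
        have hrf : r.length ≤ f := by simp [List.length_append, htl] at hf; omega
        obtain ⟨hle, hlt⟩ := IH r hrn f hrf
        refine ⟨?_, ?_⟩
        · rw [pvA_tok1, hsc]
          simp [List.length_append]
          omega
        · intro hp
          have := hlt (pvInfix_tok1 r hp)
          rw [pvA_tok1, hsc]
          simp [List.length_append]
          omega
    by_cases h2 : pvT2 <+: l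
    · obtain ⟨r, rfl⟩ := h2
      have htl : pvT2.length = 18 := by decide
      cases fuel with
      | zero => exfalso; simp [List.length_append, htl] at hf
      | succ f =>
        have hsc : pvScanGo (f + 1) (pvT2 ++ r) = pvV2 ++ pvScanGo f r := by
          simp [pvScanGo, pvTry_tok2, List.drop_left]
        have hrn : r.length ≤ m := by simp [List.length_append, htl] at hl; omega
        have hrf : r.length ≤ f := by simp [List.length_append, htl] at hf; omega
        obtain ⟨hle, hlt⟩ := IH r hrn f hrf
        refine ⟨?_, ?_⟩
        · rw [pvA_tok2, hsc]
          simp [List.length_append]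
          omega
        · intro hp
          have := hlt (pvInfix_tok2 r hp)
          rw [pvA_tok2, hsc]
          simp [List.length_append]
          omega
    by_cases h3 : pvT3 <+: l
    · obtain ⟨r, rfl⟩ := h3
      have htl : pvT3.length = 19 := by decide
      cases fuel with
      | zero => exfalso; simp [List.length_append, htl] at hf
      | succ f =>
        have hsc : pvScanGo (f + 1) (pvT3 ++ r) = pvV3 ++ pvScanGo f r := by
          simp [pvScanGo, pvTry_tok3, List.drop_left]
        have hrn : r.length ≤ m := by simp [List.length_append, htl] at hl; omega
        have hrf : r.length ≤ f := by simp [List.length_append, htl] at hf; omega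
        obtain ⟨hle, hlt⟩ := IH r hrn f hrf
        refine ⟨?_, ?_⟩
        · rw [pvA_tok3, hsc]
          simp [List.length_append]
          omega
        · intro hp
          have := hlt (pvInfix_tok3 r hp)
          rw [pvA_tok3, hsc]
          simp [List.length_append]
          omega
    by_cases h4 : pvT4 <+: l
    · obtain ⟨r, rfl⟩ := h4
      have htl : pvT4.length = 12 := by decide
      cases fuel with
      | zero => exfalso; simp [List.length_append, htl] at hf
      | succ f =>
        have hsc : pvScanGo (f + 1) (pvT4 ++ r) = pvV4 ++ pvScanGo f r := by
          simp [pvScanGo, pvTry_tok4, List.drop_left]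
        have hrn : r.length ≤ m := by simp [List.length_append, htl] at hl; omega
        have hrf : r.length ≤ f := by simp [List.length_append, htl] at hf; omega
        obtain ⟨hle, hlt⟩ := IH r hrn f hrf
        refine ⟨?_, ?_⟩
        · rw [pvA_tok4, hsc]
          simp [List.length_append]
          omega
        · intro hp
          have := hlt (pvInfix_tok4 r hp)
          rw [pvA_tok4, hsc]
          simp [List.length_append]
          omega
    by_cases h5 : pvT5 <+: l
    · obtain ⟨r, rfl⟩ := h5
      have htl : pvT5.length = 12 := by decide
      cases fuel with
      | zero => exfalso; simp [List.length_append, htl] at hf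
      | succ f =>
        have hsc : pvScanGo (f + 1) (pvT5 ++ r) = pvV5 ++ pvScanGo f r := by
          simp [pvScanGo, pvTry_tok5, List.drop_left]
        have hrn : r.length ≤ m := by simp [List.length_append, htl] at hl; omega
        have hrf : r.length ≤ f := by simp [List.length_append, htl] at hf; omega
        obtain ⟨hle, hlt⟩ := IH r hrn f hrf
        refine ⟨?_, ?_⟩
        · rw [pvA_tok5, hsc]
          simp [List.length_append]
          omega
        · intro hp
          have := hlt (pvInfix_tok5 r hp)
          rw [pvA_tok5, hsc]
          simp [List.length_append]
          omega
    by_cases h6 : pvT6 <+: l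
    · obtain ⟨r, rfl⟩ := h6
      have htl : pvT6.length = 17 := by decide
      cases fuel with
      | zero => exfalso; simp [List.length_append, htl] at hf
      | succ f =>
        have hsc : pvScanGo (f + 1) (pvT6 ++ r) = pvV6 ++ pvScanGo f r := by
          simp [pvScanGo, pvTry_tok6, List.drop_left]
        have hrn : r.length ≤ m := by simp [List.length_append, htl] at hl; omega
        have hrf : r.length ≤ f := by simp [List.length_append, htl] at hf; omega
        obtain ⟨hle, hlt⟩ := IH r hrn f hrf
        refine ⟨?_, ?_⟩
        · rw [pvA_tok6, hsc]
          simp [List.length_append]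
          omega
        · intro hp
          have := hlt (pvInfix_tok6 r hp)
          rw [pvA_tok6, hsc]
          simp [List.length_append]
          omega
    by_cases hpp : pvPat <+: l
    · obtain ⟨w, rfl⟩ := hpp
      have h39 : pvPat.length = 39 := by decide
      cases fuel with
      | zero => exfalso; simp [List.length_append, h39] at hf
      | succ f =>
        have hwn : w.length ≤ m := by simp [List.length_append, h39] at hl; omega
        have hfw : 39 + w.length ≤ f + 1 := by simp [List.length_append, h39] at hf; omega
        have e0 : pvPat ++ w = '@' :: ("cdmDatabaseSchem".toList ++ (pvT1 ++ w)) := by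
          rw [(by decide : pvPat = '@' :: ("cdmDatabaseSchem".toList ++ pvT1))]
          simp
        have hnone := pvTry_none ('@' :: ("cdmDatabaseSchem".toList ++ (pvT1 ++ w)))
          (e0 ▸ h1) (e0 ▸ h2) (e0 ▸ h3) (e0 ▸ h4) (e0 ▸ h5) (e0 ▸ h6)
        have s1 : pvScanGo (f + 1) (pvPat ++ w)
            = '@' :: pvScanGo f ("cdmDatabaseSchem".toList ++ (pvT1 ++ w)) := by
          rw [e0]
          simp only [pvScanGo]
          rw [hnone]
        have s2 : pvScanGo f ("cdmDatabaseSchem".toList ++ (pvT1 ++ w))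
            = "cdmDatabaseSchem".toList ++ pvScanGo (f - 16) (pvT1 ++ w) := by
          have := pvScan_skip_free ("cdmDatabaseSchem".toList) f (pvT1 ++ w) (by decide)
            (by simp [List.length_append, (by decide : pvT1.length = 22),
                (by decide : ("cdmDatabaseSchem".toList).length = 16)]; omega)
          simpa [(by decide : ("cdmDatabaseSchem".toList).length = 16)] using this
        obtain ⟨g, hg⟩ : ∃ g, f - 16 = g + 1 := ⟨f - 17, by omega⟩
        have s3 : pvScanGo (f - 16) (pvT1 ++ w) = pvV1 ++ pvScanGo g w := by
          rw [hg]
          simp [pvScanGo, pvTry_tok1, List.drop_left]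
        have hwg : w.length ≤ g := by omega
        obtain ⟨hle, _⟩ := IH w hwn g hwg
        have hA := pvA_pat w h1
        have hlen : (pvScanGo (f + 1) (pvPat ++ w)).length = 33 + (pvScanGo g w).length := by
          rw [s1, s2, s3]
          simp only [List.length_cons, List.length_append,
            (by decide : ("cdmDatabaseSchem".toList).length = 16),
            (by decide : pvV1.length = 16)]
          omega
        have hlenA : (pvA (pvPat ++ w)).length = 18 + (pvA w).length := by
          rw [hA]
          simp only [List.length_cons, List.length_append,
            (by decide : pvV2.length = 3),
            (by decide : ("chilles_scratch".toList).length = 15)]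
          omega
        exact ⟨by omega, fun _ => by omega⟩
    · cases l with
      | nil =>
        refine ⟨by simp [pvA, pvRep_nil, pvScanGo_nil], fun hp => absurd (by simpa using hp) (by decide)⟩
      | cons c r =>
        cases fuel with
        | zero => exfalso; simp at hf
        | succ f =>
          have hp' : c = '@' → ¬ pvPat.tail <+: r := by
            intro hc hpre
            apply hpp
            rw [(by decide : pvPat = '@' :: pvPat.tail)]
            exact List.cons_prefix_cons.mpr ⟨hc.symm, hpre⟩
          have hA := pvA_cons c r h1 h2 h3 h4 h5 h6 hp'
          have hn := pvTry_none (c :: r) h1 h2 h3 h4 h5 h6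
          have hsc : pvScanGo (f + 1) (c :: r) = c :: pvScanGo f r := by
            simp [pvScanGo, hn]
          obtain ⟨hle, hlt⟩ := IH r (by simp at hl; omega) f (by simp at hf; omega)
          refine ⟨by rw [hA, hsc]; simp; omega, ?_⟩
          intro hp
          have hinr : pvPat <:+: r := by
            obtain ⟨t, hpt, hts⟩ := List.infix_iff_prefix_suffix.mp hp
            rcases List.suffix_cons_iff.mp hts with h' | h'
            · exact absurd (h' ▸ hpt : pvPat <+: c :: r) hpp
            · exact List.infix_iff_prefix_suffix.mpr ⟨t, hpt, h'⟩
          have := hlt hinr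
          rw [hA, hsc]
          simp
          omega

-- bridge: port A computes pvA
theorem pvA_bridge (s : String) : replace_tokens s = String.ofList (pvA s.toList) := by
  have hitems : PySem.Dict.items pvReplacements =
      [("@scratchDatabaseSchema", "achilles_scratch"),
       ("@cdmDatabaseSchema", "cdm"),
       ("@tempAchillesPrefix", "temp_achilles"),
       ("@schemaDelim", "."),
       ("@source_name", "Oxford"),
       ("@achilles_version", "Paris-0.0.1")] := rfl
  have E1 : ∀ l, PySem.Chars.replace l "@scratchDatabaseSchema".toList "achilles_scratch".toList
      = pvRep "@scratchDatabaseSchema".toList "achilles_scratch".toList l :=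
    fun l => pvReplace_eq _ _ l (by decide)
  have E2 : ∀ l, PySem.Chars.replace l "@cdmDatabaseSchema".toList "cdm".toList
      = pvRep "@cdmDatabaseSchema".toList "cdm".toList l :=
    fun l => pvReplace_eq _ _ l (by decide)
  have E3 : ∀ l, PySem.Chars.replace l "@tempAchillesPrefix".toList "temp_achilles".toList
      = pvRep "@tempAchillesPrefix".toList "temp_achilles".toList l :=
    fun l => pvReplace_eq _ _ l (by decide)
  have E4 : ∀ l, PySem.Chars.replace l "@schemaDelim".toList ".".toList
      = pvRep "@schemaDelim".toList ".".toList l :=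
    fun l => pvReplace_eq _ _ l (by decide)
  have E5 : ∀ l, PySem.Chars.replace l "@source_name".toList "Oxford".toList
      = pvRep "@source_name".toList "Oxford".toList l :=
    fun l => pvReplace_eq _ _ l (by decide)
  have E6 : ∀ l, PySem.Chars.replace l "@achilles_version".toList "Paris-0.0.1".toList
      = pvRep "@achilles_version".toList "Paris-0.0.1".toList l :=
    fun l => pvReplace_eq _ _ l (by decide)
  simp only [replace_tokens, hitems, List.foldl_cons, List.foldl_nil, PySem.Str.replace,
    String.toList_ofList, E1, E2, E3, E4, E5, E6, pvA, pvT1, pvT2, pvT3, pvT4, pvT5,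
    pvT6, pvV1, pvV2, pvV3, pvV4, pvV5, pvV6]

-- ===== VERDICT (by name: the statement is the Claim_ definition above) =====
theorem replace_tokens_spec : Claim_unchanged_replace_tokens := by
  intro s _ hD
  have hinf : ¬ pvPat <:+: s.toList := by
    intro h
    exact hD ((PySem.Str.isIn_iff_infix _ _).mpr h)
  rw [pvA_bridge, replace_tokens_alt, pvMain s.toList.length s.toList le_rfl hinf]

theorem replace_tokens_changed : Claim_changed_replace_tokens := by
  unfold Claim_changed_replace_tokens; decide

theorem replace_tokens_tight : Claim_exact_replace_tokens := by
  intro s _ hD heq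
  have hinf : pvPat <:+: s.toList :=
    (PySem.Str.isIn_iff_infix "@cdmDatabaseSchem@scratchDatabaseSchema" s).mp hD
  have hlt := (pvLen s.toList.length s.toList le_rfl s.toList.length le_rfl).2 hinf
  rw [pvA_bridge s] at heq
  have h2 : replace_tokens_alt s = String.ofList (pvScanGo s.toList.length s.toList) := rfl
  rw [h2] at heq
  have := congrArg String.toList heq
  rw [String.toList_ofList, String.toList_ofList] at this
  rw [this] at hlt
  omega
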